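-- pv_equiv track=rewrite | github.com/Amna1922/CV-Analyzer-System | rabin_karp.py | search
-- ===== SOURCE A (Python) =====
-- def search(text, pattern, case_sensitive=False, prime=101):
--     """
--     Search for pattern in text using Rabin-Karp algorithm
--
--     Args:
--         text (str): The text to search in
--         pattern (str): The pattern to search for
--         case_sensitive (bool): Whether search should be case sensitive
--         prime (int): A prime number for hash calculation
--
--     Returns:
--         tuple: (found, positions, comparisons)
--     """
--     if not text or not pattern:
--         return False, [], 0
--
--     if not case_sensitive:
--         text = text.lower()
--         pattern = pattern.lower()
--
--     n = len(text)
--     m = len(pattern)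
--     positions = []
--     comparisons = 0
--
--     if m > n:
--         return False, [], 0
--
--     # Calculate hash values
--     pattern_hash = 0
--     text_hash = 0
--     h = 1
--
--     # The value of h would be "pow(d, m-1) % prime"
--     d = 256  # Number of characters in the input alphabet
--
--     for i in range(m - 1):
--         h = (h * d) % prime
--
--     # Calculate initial hash values
--     for i in range(m):
--         pattern_hash = (d * pattern_hash + ord(pattern[i])) % prime
--         text_hash = (d * text_hash + ord(text[i])) % prime
--
--     # Slide the pattern over text one by one
--     for i in range(n - m + 1):
--         # Check the hash values first
--         if pattern_hash == text_hash:
--             # Check characters one by one if hash matches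
--             match = True
--             for j in range(m):
--                 comparisons += 1
--                 if text[i + j] != pattern[j]:
--                     match = False
--                     break
--
--             if match:
--                 positions.append(i)
--
--         # Calculate hash value for next window of text
--         if i < n - m:
--             text_hash = (d * (text_hash - ord(text[i]) * h) + ord(text[i + m])) % prime
--
--             # We might get negative value of text_hash, converting it to positive
--             if text_hash < 0:
--                 text_hash = text_hash + prime
--
--     return len(positions) > 0, positions, comparisons
-- ===== SOURCE B (Python) =====
-- def search(text, pattern, case_sensitive=False, prime=101):
--     """Index-then-probe Rabin-Karp: one pass groups window starts by their rolling
--     hash into a dict; only the pattern-hash bucket is then verified, counting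
--     comparisons from the matched-prefix length."""
--     if not text or not pattern:
--         return False, [], 0
--
--     if not case_sensitive:
--         text = text.lower()
--         pattern = pattern.lower()
--
--     n = len(text)
--     m = len(pattern)
--
--     if m > n:
--         return False, [], 0
--
--     d = 256
--     h = 1
--     for _ in range(m - 1):
--         h = h * d % prime
--
--     ph = 0
--     for c in pattern:
--         ph = (d * ph + ord(c)) % prime
--
--     th = 0
--     for c in text[:m]:
--         th = (d * th + ord(c)) % prime
--
--     # One pass: group every window start by its rolling hash.
--     index = {}
--     for i in range(n - m + 1):
--         index[th] = index.get(th, []) + [i]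
--         if i < n - m:
--             th = (d * (th - ord(text[i]) * h) + ord(text[i + m])) % prime
--             if th < 0:
--                 th += prime
--
--     # Probe only the bucket of the pattern's hash.
--     positions = []
--     comparisons = 0
--     for i in index.get(ph, []):
--         k = 0
--         while k < m and text[i + k] == pattern[k]:
--             k += 1
--         comparisons += k + 1 if k < m else m
--         if k == m:
--             positions.append(i)
--
--     return len(positions) > 0, positions, comparisons
-- ===== Notes on version B (the rewrite author's own statement) =====
-- stated objective: alternative
-- what changed: B replaces A's fused scan-and-test loop by an index-then-probe structure: one rolling pass groups every window start into a dict keyed by window hash, then only the bucket of the pattern's hash is verified, and the per-window comparison count is derived arithmetically from a matched-prefix length computed by a while loop instead of A's flag-and-break for loop.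
import Mathlib
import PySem

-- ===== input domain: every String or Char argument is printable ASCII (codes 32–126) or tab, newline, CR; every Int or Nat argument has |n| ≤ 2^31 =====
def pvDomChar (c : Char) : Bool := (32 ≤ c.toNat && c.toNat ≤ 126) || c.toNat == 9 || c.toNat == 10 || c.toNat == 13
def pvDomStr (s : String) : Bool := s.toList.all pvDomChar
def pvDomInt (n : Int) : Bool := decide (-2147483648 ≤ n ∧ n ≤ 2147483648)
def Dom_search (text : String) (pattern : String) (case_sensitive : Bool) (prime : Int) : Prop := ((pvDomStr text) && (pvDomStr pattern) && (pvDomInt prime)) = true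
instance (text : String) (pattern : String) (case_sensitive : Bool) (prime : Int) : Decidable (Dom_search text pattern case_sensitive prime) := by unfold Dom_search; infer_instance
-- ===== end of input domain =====

-- B restructures A's fused scan as index-then-probe: a rolling pass groups window starts by
-- hash in a dict, only the pattern-hash bucket is verified, comparisons counted via a
-- matched-prefix length (objective: alternative; same return value).

-- ===== PORT A =====

def pvOrd (c : Char) : Int := (c.toNat : Int)

-- the rolling-hash update both Pythons share verbatim:
-- th = (256*(th - ord(text[i])*h) + ord(text[i+m])) % prime; if th < 0: th += prime
def pvRoll (t : List Char) (h prime m th i : Int) : Int :=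
  let x := PySem.Int.mod (256 * (th - pvOrd (PySem.List.pyGetD t i ' ') * h) +
            pvOrd (PySem.List.pyGetD t (i + m) ' ')) prime
  if x < 0 then x + prime else x

-- inner verification loop of A: 'for j in range(m): comparisons += 1; if text[i+j] != pattern[j]: break'
def pvCmpA (t p : List Char) (i : Int) : Int → Nat → Int × Bool
  | _, 0 => (0, true)
  | j, fuel + 1 =>
    if PySem.List.pyGetD t (i + j) ' ' ≠ PySem.List.pyGetD p j ' ' then (1, false)
    else
      let r := pvCmpA t p i (j + 1) fuel
      (r.1 + 1, r.2)

-- A's fused main loop: state (text_hash, positions, comparisons), rolling update interleaved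
def pvLoopA (t p : List Char) (ph h prime n m : Int) :
    List Int → Int → List Int → Int → Int × List Int × Int
  | [], th, pos, comp => (th, pos, comp)
  | i :: is, th, pos, comp =>
    let st :=
      if ph = th then
        let r := pvCmpA t p i 0 m.toNat
        (if r.2 then pos ++ [i] else pos, comp + r.1)
      else (pos, comp)
    let th' := if i < n - m then pvRoll t h prime m th i else th
    pvLoopA t p ph h prime n m is th' st.1 st.2

def search (text : String) (pattern : String) (case_sensitive : Bool) (prime : Int) : Bool × List Int × Int :=
  if text.toList = [] ∨ pattern.toList = [] then (false, [], 0)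
  else
    let t := if case_sensitive then text.toList else PySem.Chars.lower text.toList
    let p := if case_sensitive then pattern.toList else PySem.Chars.lower pattern.toList
    let n : Int := t.length
    let m : Int := p.length
    if m > n then (false, [], 0)
    else
      let h := (PySem.List.pyRange 0 (m - 1) 1).foldl (fun h _ => PySem.Int.mod (h * 256) prime) 1
      let s := (PySem.List.pyRange 0 m 1).foldl
        (fun (s : Int × Int) i =>
          (PySem.Int.mod (256 * s.1 + pvOrd (PySem.List.pyGetD p i ' ')) prime,
           PySem.Int.mod (256 * s.2 + pvOrd (PySem.List.pyGetD t i ' ')) prime)) (0, 0)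
      let r := pvLoopA t p s.1 h prime n m (PySem.List.pyRange 0 (n - m + 1) 1) s.2 [] 0
      (decide (0 < r.2.1.length), r.2.1, r.2.2)

-- ===== PORT B =====

-- B's 'while k < m and text[i+k] == pattern[k]: k += 1'; the fuel is m.toNat with k starting
-- at 0 and increasing by 1, so it encodes exactly the 'k < m' bound
def pvPref (t p : List Char) (i : Int) : Int → Nat → Int
  | k, 0 => k
  | k, fuel + 1 =>
    if PySem.List.pyGetD t (i + k) ' ' = PySem.List.pyGetD p k ' ' then
      pvPref t p i (k + 1) fuel
    else k

-- B's index-building pass: 'index[th] = index.get(th, []) + [i]' then the guarded roll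
def pvIndexB (t : List Char) (h prime n m : Int) :
    List Int → PySem.Dict Int (List Int) → Int → PySem.Dict Int (List Int) × Int
  | [], d, th => (d, th)
  | i :: is, d, th =>
    pvIndexB t h prime n m is (d.modify th [] (· ++ [i]))
      (if i < n - m then pvRoll t h prime m th i else th)

-- B's probe loop over the bucket of the pattern's hash
def pvProbeB (t p : List Char) (m : Int) : List Int → List Int → Int → List Int × Int
  | [], pos, comp => (pos, comp)
  | i :: is, pos, comp =>
    let k := pvPref t p i 0 m.toNat
    pvProbeB t p m is (if k = m then pos ++ [i] else pos)
      (comp + if k < m then k + 1 else m)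

def search_alt (text : String) (pattern : String) (case_sensitive : Bool) (prime : Int) : Bool × List Int × Int :=
  if text.toList = [] ∨ pattern.toList = [] then (false, [], 0)
  else
    let t := if case_sensitive then text.toList else PySem.Chars.lower text.toList
    let p := if case_sensitive then pattern.toList else PySem.Chars.lower pattern.toList
    let n : Int := t.length
    let m : Int := p.length
    if m > n then (false, [], 0)
    else
      let h := (PySem.List.pyRange 0 (m - 1) 1).foldl (fun h _ => PySem.Int.mod (h * 256) prime) 1
      let ph := p.foldl (fun a c => PySem.Int.mod (256 * a + pvOrd c) prime) 0
      let th0 := (PySem.List.slice t none (some m)).foldl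
        (fun a c => PySem.Int.mod (256 * a + pvOrd c) prime) 0
      let idx := (pvIndexB t h prime n m (PySem.List.pyRange 0 (n - m + 1) 1) PySem.Dict.empty th0).1
      let r := pvProbeB t p m (idx.getD ph []) [] 0
      (decide (0 < r.1.length), r.1, r.2)

-- ===== PRECONDITION & SPEC =====
-- Pre_ excludes only the inputs where Python raises ZeroDivisionError: prime = 0 while the
-- hash loops are actually reached (both strings nonempty and the pattern not longer than the text).
def Pre_search (text : String) (pattern : String) (case_sensitive : Bool) (prime : Int) : Prop :=
  prime ≠ 0 ∨ text.toList = [] ∨ pattern.toList = [] ∨ text.toList.length < pattern.toList.length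
instance (text : String) (pattern : String) (case_sensitive : Bool) (prime : Int) : Decidable (Pre_search text pattern case_sensitive prime) := by unfold Pre_search; infer_instance

def pvWitness_search : String × String × Bool × Int := ("abcab", "ab", false, 101)

def Spec_search (text : String) (pattern : String) (case_sensitive : Bool) (prime : Int) (out : Bool × List Int × Int) : Prop := out = search_alt text pattern case_sensitive prime
instance (text : String) (pattern : String) (case_sensitive : Bool) (prime : Int) (out : Bool × List Int × Int) : Decidable (Spec_search text pattern case_sensitive prime out) := by unfold Spec_search; infer_instance

-- ===== CLAIM (what is proved, stated in full; the proofs are below) =====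
def Claim_equal_search : Prop := ∀ (text : String) (pattern : String) (case_sensitive : Bool) (prime : Int), Dom_search text pattern case_sensitive prime → Pre_search text pattern case_sensitive prime → Spec_search text pattern case_sensitive prime (search text pattern case_sensitive prime)

-- ===== LEMMAS AND PROOFS =====

-- the matched-prefix pointer never moves backwards
lemma pvPref_ge (t p : List Char) (i : Int) : ∀ (fuel : Nat) (j : Int), j ≤ pvPref t p i j fuel := by
  intro fuel
  induction fuel with
  | zero => intro j; simp [pvPref]
  | succ f ih =>
    intro j
    by_cases hc : PySem.List.pyGetD t (i + j) ' ' = PySem.List.pyGetD p j ' '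
    · rw [pvPref, if_pos hc]; have := ih (j + 1); omega
    · rw [pvPref, if_neg hc]

-- A's counting inner loop expressed through B's matched-prefix length
lemma pvCmpA_eq_pref (t p : List Char) (i : Int) : ∀ (fuel : Nat) (j : Int),
    pvCmpA t p i j fuel =
      (if pvPref t p i j fuel - j < (fuel : Int) then pvPref t p i j fuel - j + 1 else (fuel : Int),
       decide (pvPref t p i j fuel - j = (fuel : Int))) := by
  intro fuel
  induction fuel with
  | zero => intro j; simp [pvCmpA, pvPref]
  | succ f ih =>
    intro j
    by_cases hc : PySem.List.pyGetD t (i + j) ' ' = PySem.List.pyGetD p j ' '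
    · have hk : j + 1 ≤ pvPref t p i (j + 1) f := pvPref_ge t p i f (j + 1)
      simp only [pvCmpA, pvPref, hc, reduceIte, ih (j + 1)]
      rw [if_neg (fun hne => hne rfl)]
      simp only [Prod.mk.injEq]
      refine ⟨?_, ?_⟩
      · split_ifs <;> push_cast <;> omega
      · rw [decide_eq_decide]; push_cast; omega
    · have hne : ¬ ((0:Int) = (f : Int) + 1) := by omega
      simp only [pvCmpA, pvPref, ne_eq, hc, reduceIte, not_false_eq_true, sub_self]
      rw [if_pos (show (0:Int) < ((f + 1 : Nat) : Int) by push_cast; omega)]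
      push_cast
      simp [hne]

-- proof-side list of (window hash, window start) pairs produced by the rolling pass
def pvPairs (t : List Char) (h prime n m : Int) : List Int → Int → List (Int × Int)
  | [], _ => []
  | i :: is, th =>
    (th, i) :: pvPairs t h prime n m is (if i < n - m then pvRoll t h prime m th i else th)

-- B's index pass is the modify-fold over pvPairs
lemma pvIndexB_eq_foldl (t : List Char) (h prime n m : Int) : ∀ (rs : List Int)
    (d : PySem.Dict Int (List Int)) (th : Int),
    (pvIndexB t h prime n m rs d th).1 =
      (pvPairs t h prime n m rs th).foldl (fun d q => d.modify q.1 [] (· ++ [q.2])) d := by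
  intro rs
  induction rs with
  | nil => intro d th; rfl
  | cons i is ih => intro d th; simp only [pvIndexB, pvPairs, List.foldl_cons, ih]

-- one unfolding step of A's fused loop
lemma pvLoopA_cons (t p : List Char) (ph h prime n m i : Int) (is : List Int)
    (th : Int) (pos : List Int) (comp : Int) :
    pvLoopA t p ph h prime n m (i :: is) th pos comp
      = pvLoopA t p ph h prime n m is
          (if i < n - m then pvRoll t h prime m th i else th)
          (if ph = th then (if (pvCmpA t p i 0 m.toNat).2 then pos ++ [i] else pos) else pos)
          (if ph = th then comp + (pvCmpA t p i 0 m.toNat).1 else comp) := by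
  by_cases hph : ph = th <;> simp only [pvLoopA, hph, if_true, if_false, reduceIte]

-- A's fused loop equals B's probe of the pattern-hash bucket of pvPairs
lemma pvMainEq (t p : List Char) (ph h prime n m : Int) (hm : 0 ≤ m) :
    ∀ (rs : List Int) (th : Int) (pos : List Int) (comp : Int),
      (pvLoopA t p ph h prime n m rs th pos comp).2 =
        pvProbeB t p m
          (((pvPairs t h prime n m rs th).filter (fun q => q.1 == ph)).map (·.2)) pos comp := by
  intro rs
  induction rs with
  | nil => intro th pos comp; rfl
  | cons i is ih =>
    intro th pos comp
    rw [pvLoopA_cons, pvPairs]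
    by_cases hth : ph = th
    · have hbeq : ((th, i).1 == ph) = true := by simp [hth]
      rw [if_pos hth, if_pos hth]
      simp only [List.filter_cons, hbeq, if_true, List.map_cons, pvProbeB]
      have hmn : ((m.toNat : Nat) : Int) = m := Int.toNat_of_nonneg hm
      rw [pvCmpA_eq_pref]
      simp only [sub_zero, hmn, decide_eq_true_eq]
      exact ih _ _ _
    · have hbeq : ((th, i).1 == ph) = false := by simp; exact fun e => hth e.symm
      rw [if_neg hth, if_neg hth]
      simp only [List.filter_cons, hbeq, Bool.false_eq_true, if_false]
      exact ih _ _ _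

-- A's joint initial-hash loop over indices = B's two folds over the characters
lemma pvInit_eq (t p : List Char) (prime : Int) (hmn : p.length ≤ t.length) :
    (PySem.List.pyRange 0 (p.length : Int) 1).foldl
      (fun (s : Int × Int) i =>
        (PySem.Int.mod (256 * s.1 + pvOrd (PySem.List.pyGetD p i ' ')) prime,
         PySem.Int.mod (256 * s.2 + pvOrd (PySem.List.pyGetD t i ' ')) prime)) (0, 0)
      = (p.foldl (fun a c => PySem.Int.mod (256 * a + pvOrd c) prime) 0,
         (t.take p.length).foldl (fun a c => PySem.Int.mod (256 * a + pvOrd c) prime) 0) := by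
  rw [PySem.List.foldl_prod_mk
      (f := fun acc i => PySem.Int.mod (256 * acc + pvOrd (PySem.List.pyGetD p i ' ')) prime)
      (g := fun acc i => PySem.Int.mod (256 * acc + pvOrd (PySem.List.pyGetD t i ' ')) prime)]
  simp only [Prod.mk.injEq]
  constructor
  · exact PySem.List.foldl_pyRange_zero_pyGetD' p ' '
      (fun a c => PySem.Int.mod (256 * a + pvOrd c) prime) 0
  · have hcongr : ∀ i ∈ PySem.List.pyRange 0 (p.length : Int) 1, ∀ acc : Int,
        PySem.Int.mod (256 * acc + pvOrd (PySem.List.pyGetD t i ' ')) prime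
          = PySem.Int.mod (256 * acc + pvOrd (PySem.List.pyGetD (t.take p.length) i ' ')) prime := by
      intro i hi acc
      rw [PySem.List.mem_pyRange_one] at hi
      have h1 : PySem.List.pyGetD t i ' ' = PySem.List.pyGetD (t.take p.length) i ' ' := by
        rw [PySem.List.pyGetD_eq_getElem t ' ' hi.1 (by omega),
            PySem.List.pyGetD_eq_getElem (t.take p.length) ' ' hi.1 (by simp; omega)]
        simp [List.getElem_take]
      rw [h1]
    rw [PySem.List.foldl_congr_mem' _ _ _ _ hcongr]
    have hlen : ((t.take p.length).length : Int) = (p.length : Int) := by simp; omega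
    rw [← hlen]
    exact PySem.List.foldl_pyRange_zero_pyGetD' (t.take p.length) ' '
      (fun a c => PySem.Int.mod (256 * a + pvOrd c) prime) 0

-- ===== VERDICT (by name: the statement is the Claim_ definition above) =====
theorem search_spec : Claim_equal_search := by
  intro text pattern case_sensitive prime _ _
  unfold Spec_search search search_alt
  by_cases hg : text.toList = [] ∨ pattern.toList = []
  · rw [if_pos hg, if_pos hg]
  · rw [if_neg hg, if_neg hg]
    dsimp only
    set t := if case_sensitive = true then text.toList else PySem.Chars.lower text.toList with ht
    set p := if case_sensitive = true then pattern.toList else PySem.Chars.lower pattern.toList with hp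
    by_cases hmn : (p.length : Int) > (t.length : Int)
    · rw [if_pos hmn, if_pos hmn]
    · rw [if_neg hmn, if_neg hmn]
      have hmn' : p.length ≤ t.length := by omega
      rw [pvInit_eq t p prime hmn', PySem.List.slice_to_natCast]
      dsimp only
      rw [pvIndexB_eq_foldl, PySem.Dict.getD_foldl_modify_append, PySem.Dict.getD_empty]
      rw [List.nil_append]
      rw [pvMainEq t p _ _ prime _ _ (by positivity)]
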